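-- pv_equiv track=rewrite | github.com/RafaelMenesesRibeiro/SameGameAI | samegameai.py | concatenate_columns
-- ===== SOURCE A (Python) =====
-- def concatenate_columns(boardcopy, lines, columns):
-- 	#Initiates the horizontal displcament at 0.
-- 	displacement = 0
-- 	#Traverses the columns from the left to the right.
-- 	for c in range(columns):
-- 		#If the column is empty, increments the number of columns the columns to
-- 		#the right need to shift left.
-- 		if boardcopy[lines - 1][c] == 0:
-- 			displacement += 1
-- 		#If the column is not empty and it needs to move left, shifts it.
-- 		elif displacement > 0:
-- 			for l in range(lines):
-- 				boardcopy[l][c - displacement] = boardcopy[l][c]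
-- 				boardcopy[l][c] = 0
-- 	#Returns the altered board.
-- 	return boardcopy
-- ===== SOURCE B (Python) =====
-- def concatenate_columns(boardcopy, lines, columns):
-- 	# Gather-then-rewrite: collect the non-empty columns once, then rewrite each
-- 	# row: kept column values on the left, zeros over the vacated kept columns.
-- 	bottom_row = boardcopy[lines - 1]
-- 	kept = [c for c in range(columns) if bottom_row[c] != 0]
-- 	cols = [[boardcopy[l][c] for l in range(lines)] for c in kept]
-- 	k = len(kept)
-- 	vacated = [c for c in kept if c >= k]
-- 	for l in range(lines):
-- 		row = boardcopy[l]
-- 		for i in range(k):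
-- 			row[i] = cols[i][l]
-- 		for c in vacated:
-- 			row[c] = 0
-- 	return boardcopy
-- ===== Notes on version B (the rewrite author's own statement) =====
-- stated objective: alternative
-- what changed: Replaces A's running displacement counter with in-place column-by-column shifting by a two-pass gather-then-rewrite: first collect the non-empty columns' contents, then rewrite each row once (kept values on the left, zeros over the vacated kept columns).
-- outside the precondition, e.g. on concatenate_columns([[1], [2, 3]], 2, 2): A returns [[1], [2, 3]], B raises IndexError; on concatenate_columns([], 1, 0): A returns [], B raises IndexError
import Mathlib
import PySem

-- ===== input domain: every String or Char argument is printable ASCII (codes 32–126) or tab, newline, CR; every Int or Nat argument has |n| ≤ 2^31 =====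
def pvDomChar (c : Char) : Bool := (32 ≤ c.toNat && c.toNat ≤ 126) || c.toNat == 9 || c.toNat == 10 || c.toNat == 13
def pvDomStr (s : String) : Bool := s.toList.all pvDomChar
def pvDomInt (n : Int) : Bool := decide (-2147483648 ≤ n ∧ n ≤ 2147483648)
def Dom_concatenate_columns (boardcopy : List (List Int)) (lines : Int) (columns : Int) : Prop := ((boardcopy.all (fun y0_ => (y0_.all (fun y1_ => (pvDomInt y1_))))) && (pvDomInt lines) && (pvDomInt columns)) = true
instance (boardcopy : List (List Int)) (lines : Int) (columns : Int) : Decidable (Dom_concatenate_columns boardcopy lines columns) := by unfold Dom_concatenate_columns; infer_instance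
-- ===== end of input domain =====

-- B replaces A's in-place column shifting with a running displacement counter by a
-- two-pass gather-then-rewrite of the board (alternative decomposition, same cost).
-- Both Pythons mutate boardcopy in place identically; the equivalence proved here is
-- about the returned value.

-- cell read boardcopy[l][c]: exact for indices that do not raise (Pre_ guarantees
-- in-range, so the .getD defaults are never taken on admitted inputs)
def pvCell (b : List (List Int)) (l c : Int) : Int :=
  ((PySem.List.pyGet? ((PySem.List.pyGet? b l).getD []) c)).getD 0

-- cell write boardcopy[l][c] = v: exact for non-negative in-range indices
-- (guaranteed by Pre_; Python's negative-index wraparound cannot occur there)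
def pvSet (b : List (List Int)) (l c : Int) (v : Int) : List (List Int) :=
  b.set l.toNat ((b.getD l.toNat []).set c.toNat v)

-- ===== PORT A =====
def concatenate_columns (boardcopy : List (List Int)) (lines : Int) (columns : Int) : List (List Int) :=
  ((PySem.List.pyRange 0 columns 1).foldl
    (fun (st : List (List Int) × Int) c =>
      if pvCell st.1 (lines - 1) c == 0 then (st.1, st.2 + 1)
      else if st.2 > 0 then
        ((PySem.List.pyRange 0 lines 1).foldl
          (fun b l => pvSet (pvSet b l (c - st.2) (pvCell b l c)) l c 0) st.1, st.2)
      else st)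
    (boardcopy, 0)).1

-- ===== PORT B =====
def concatenate_columns_alt (boardcopy : List (List Int)) (lines : Int) (columns : Int) : List (List Int) :=
  let bottom_row := (PySem.List.pyGet? boardcopy (lines - 1)).getD []
  let kept := (PySem.List.pyRange 0 columns 1).filter
    (fun c => !(((PySem.List.pyGet? bottom_row c).getD 0) == 0))
  let cols := kept.map (fun c => (PySem.List.pyRange 0 lines 1).map (fun l => pvCell boardcopy l c))
  let k : Int := kept.length
  let vacated := kept.filter (fun c => decide (k ≤ c))
  (PySem.List.pyRange 0 lines 1).foldl
    (fun b l =>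
      let b1 := (PySem.List.pyRange 0 k 1).foldl
        (fun b i => pvSet b l i (((PySem.List.pyGet? ((PySem.List.pyGet? cols i).getD []) l)).getD 0)) b
      vacated.foldl (fun b c => pvSet b l c 0) b1)
    boardcopy

-- ===== PRECONDITION & SPEC =====
-- Pre_ requires the bottom row boardcopy[lines-1] to exist (Python negative indexing)
-- and be at least `columns` wide, and, when lines >= 1, every addressed row (the first
-- `lines`) to be at least `columns` wide.  Outside it A raises IndexError, or A happens
-- to return while B raises: with columns <= 0 and no valid row lines-1 A never indexes
-- the board, and on ragged boards where no shift reaches the short rows A never reads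
-- them, while B's unconditional bottom-row lookup / column gather raises; those inputs
-- are excluded.
def Pre_concatenate_columns (boardcopy : List (List Int)) (lines : Int) (columns : Int) : Prop :=
  -(boardcopy.length : Int) ≤ lines - 1 ∧ lines - 1 < (boardcopy.length : Int) ∧
  columns ≤ ((((PySem.List.pyGet? boardcopy (lines - 1)).getD []).length : Nat) : Int) ∧
  (lines ≤ 0 ∨ ∀ row ∈ boardcopy.take lines.toNat, columns ≤ (row.length : Int))
instance (boardcopy : List (List Int)) (lines : Int) (columns : Int) : Decidable (Pre_concatenate_columns boardcopy lines columns) := by unfold Pre_concatenate_columns; infer_instance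

def pvWitness_concatenate_columns : List (List Int) × Int × Int := ([[5, 0, 2], [3, 0, 4]], 2, 3)

def Spec_concatenate_columns (boardcopy : List (List Int)) (lines : Int) (columns : Int) (out : List (List Int)) : Prop := out = concatenate_columns_alt boardcopy lines columns
instance (boardcopy : List (List Int)) (lines : Int) (columns : Int) (out : List (List Int)) : Decidable (Spec_concatenate_columns boardcopy lines columns out) := by unfold Spec_concatenate_columns; infer_instance

-- ===== CLAIM (what is proved, stated in full; the proofs are below) =====
def Claim_equal_concatenate_columns : Prop := ∀ (boardcopy : List (List Int)) (lines : Int) (columns : Int), Dom_concatenate_columns boardcopy lines columns → Pre_concatenate_columns boardcopy lines columns → Spec_concatenate_columns boardcopy lines columns (concatenate_columns boardcopy lines columns)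

-- ===== LEMMAS AND PROOFS =====

-- Nat-index views of the cell primitives and the shared cell description
def cellN (b : List (List Int)) (l j : Nat) : Int := (b.getD l []).getD j 0
def setN (b : List (List Int)) (l j : Nat) (v : Int) : List (List Int) :=
  b.set l ((b.getD l []).set j v)
-- the kept-column indices of a bottom row, among the first c columns
def keptRow (bottom : List Int) (c : Nat) : List Nat :=
  (List.range c).filter (fun j => decide (bottom.getD j 0 ≠ 0))
-- the value both programs leave at cell (l, j), relative to a kept list
def specCell (orig : List (List Int)) (L : Nat) (kept : List Nat) (l j : Nat) : Int :=
  if l < L then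
    if j < kept.length then cellN orig l (kept.getD j 0)
    else if j ∈ kept then 0 else cellN orig l j
  else cellN orig l j
-- board-level agreement with the common cell description
def Agrees (orig b : List (List Int)) (L : Nat) (kept : List Nat) : Prop :=
  b.length = orig.length ∧ (∀ l', ((b.getD l' []).length = ((orig.getD l' []).length))) ∧
  ∀ l' j', cellN b l' j' = specCell orig L kept l' j'

lemma pvCell_natCast (b : List (List Int)) (l j : Nat) :
    pvCell b (l : Int) (j : Int) = cellN b l j := by
  simp [pvCell, cellN, List.getD]

lemma pvSet_natCast (b : List (List Int)) (l j : Nat) (v : Int) :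
    pvSet b (l : Int) (j : Int) v = setN b l j v := by
  simp [pvSet, setN]

lemma length_setN (b : List (List Int)) (l j : Nat) (v : Int) :
    (setN b l j v).length = b.length := by simp [setN]

lemma rowlen_setN (b : List (List Int)) (l j : Nat) (v : Int) (l' : Nat) :
    ((setN b l j v).getD l' []).length = ((b.getD l' []).length) := by
  by_cases h : l' = l
  · subst h
    by_cases hl : l' < b.length
    · simp [setN, List.getD, hl]
    · simp [setN, List.getD, hl]
  · simp [setN, List.getD, List.getElem?_set_ne (by omega : l ≠ l')]

lemma cellN_setN (b : List (List Int)) (l j : Nat) (v : Int) (l' j' : Nat)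
    (hl : l < b.length) (hj : j < (b.getD l []).length) :
    cellN (setN b l j v) l' j' = if l' = l ∧ j' = j then v else cellN b l' j' := by
  simp only [List.getD] at hj
  by_cases h : l' = l
  · subst h
    simp only [cellN, setN, List.getD]
    rw [List.getElem?_set_self (by omega)]
    simp only [Option.getD_some, List.getElem?_set]
    by_cases h2 : j' = j
    · subst h2
      simp [show j' < (b[l']?.getD []).length from hj]
    · simp [h2, show ¬ (j = j') from fun hh => h2 hh.symm]
  · simp [cellN, setN, List.getD, List.getElem?_set_ne (by omega : l ≠ l'), h]

lemma keptRow_succ (bottom : List Int) (c : Nat) :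
    keptRow bottom (c + 1) =
      if bottom.getD c 0 ≠ 0 then keptRow bottom c ++ [c] else keptRow bottom c := by
  simp only [keptRow, List.range_succ, List.filter_append, List.filter_cons, List.filter_nil]
  simp only [List.getD]
  split_ifs with h1 h2 <;> simp_all

lemma keptRow_lt (bottom : List Int) (c : Nat) : ∀ j ∈ keptRow bottom c, j < c := by
  intro j hj
  simp [keptRow, List.mem_filter] at hj
  exact hj.1

lemma keptRow_len_le (bottom : List Int) (c : Nat) : (keptRow bottom c).length ≤ c := by
  simpa using List.length_filter_le _ (List.range c)

lemma keptRow_full (bottom : List Int) (c : Nat)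
    (h : (keptRow bottom c).length = c) : keptRow bottom c = List.range c := by
  have h' : (List.filter (fun j => decide (bottom.getD j 0 ≠ 0)) (List.range c)).length = (List.range c).length := by
    simpa [keptRow] using h
  have := List.length_filter_eq_length_iff.mp h'
  simpa [keptRow] using List.filter_eq_self.mpr this

lemma specCell_range (orig : List (List Int)) (L m l j : Nat) :
    specCell orig L (List.range m) l j = cellN orig l j := by
  simp only [specCell, List.length_range, List.mem_range]
  by_cases hl : l < L
  · by_cases hj : j < m
    · rw [List.getD_eq_getElem (List.range m) 0 (by simpa using hj)]
      simp [hl, hj]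
    · simp [hl, hj]
  · simp [hl]

lemma eq_of_cells (b1 b2 : List (List Int)) (hlen : b1.length = b2.length)
    (hrow : ∀ l, (b1.getD l []).length = (b2.getD l []).length)
    (hcell : ∀ l j, cellN b1 l j = cellN b2 l j) : b1 = b2 := by
  apply List.ext_getElem hlen
  intro l h1 h2
  apply List.ext_getElem
  · have := hrow l
    simpa [List.getD, List.getElem?_eq_getElem, h1, h2] using this
  · intro j hj1 hj2
    have := hcell l j
    simpa [cellN, List.getD, List.getElem?_eq_getElem, h1, h2,
      List.getElem?_eq_getElem, hj1, hj2] using this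

lemma shift_fold (b0 : List (List Int)) (L c tgt : Nat) (htgt : tgt ≠ c)
    (hL : L ≤ b0.length)
    (hc : ∀ l < L, c < (b0.getD l []).length)
    (ht : ∀ l < L, tgt < (b0.getD l []).length) :
    ((List.range L).foldl (fun b m => setN (setN b m tgt (cellN b m c)) m c 0) b0).length = b0.length ∧
    (∀ l', (((List.range L).foldl (fun b m => setN (setN b m tgt (cellN b m c)) m c 0) b0).getD l' []).length = (b0.getD l' []).length) ∧
    (∀ l' j', cellN ((List.range L).foldl (fun b m => setN (setN b m tgt (cellN b m c)) m c 0) b0) l' j' =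
      if l' < L ∧ j' = tgt then cellN b0 l' c
      else if l' < L ∧ j' = c then 0 else cellN b0 l' j') := by
  induction L with
  | zero => simp
  | succ M ih =>
    obtain ⟨ihlen, ihrow, ihcell⟩ := ih (by omega) (fun l hl => hc l (by omega)) (fun l hl => ht l (by omega))
    rw [List.range_succ, List.foldl_append, List.foldl_cons, List.foldl_nil]
    set rL := (List.range M).foldl (fun b m => setN (setN b m tgt (cellN b m c)) m c 0) b0 with hrL
    have hcL : c < (rL.getD M []).length := by rw [ihrow]; exact hc M (by omega)
    have htL : tgt < (rL.getD M []).length := by rw [ihrow]; exact ht M (by omega)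
    have hvc : cellN rL M c = cellN b0 M c := by rw [ihcell]; simp
    have hrow1 : ∀ l', ((setN rL M tgt (cellN rL M c)).getD l' []).length = ((rL.getD l' []).length) :=
      fun l' => rowlen_setN rL M tgt _ l'
    refine ⟨by simp [length_setN, ihlen], fun l' => by rw [rowlen_setN, rowlen_setN, ihrow], ?_⟩
    intro l' j'
    rw [cellN_setN _ _ _ _ _ _ (by simp [length_setN]; omega) (by rw [hrow1]; exact hcL),
        cellN_setN _ _ _ _ _ _ (by omega) htL, hvc, ihcell]
    clear hrL ihlen ihrow ihcell hvc hrow1 hcL htL hL hc ht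
    by_cases h1 : l' = M
    · subst h1
      split_ifs <;> first | rfl | omega
    · split_ifs <;> first | rfl | omega

lemma portA_loop (orig : List (List Int)) (L C : Nat) (hL : 1 ≤ L) (hLlen : L ≤ orig.length)
    (hC : ∀ l < L, C ≤ (orig.getD l []).length) :
    ∀ c, c ≤ C →
      Agrees orig ((List.range c).foldl (fun (st : List (List Int) × Int) (k : Nat) =>
          if pvCell st.1 ((L : Int) - 1) (k : Int) == 0 then (st.1, st.2 + 1)
          else if st.2 > 0 then
            ((PySem.List.pyRange 0 (L : Int) 1).foldl
              (fun b l => pvSet (pvSet b l ((k : Int) - st.2) (pvCell b l (k : Int))) l (k : Int) 0) st.1, st.2)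
          else st) (orig, 0)).1 L (keptRow (orig.getD (L-1) []) c) ∧
      ((List.range c).foldl (fun (st : List (List Int) × Int) (k : Nat) =>
          if pvCell st.1 ((L : Int) - 1) (k : Int) == 0 then (st.1, st.2 + 1)
          else if st.2 > 0 then
            ((PySem.List.pyRange 0 (L : Int) 1).foldl
              (fun b l => pvSet (pvSet b l ((k : Int) - st.2) (pvCell b l (k : Int))) l (k : Int) 0) st.1, st.2)
          else st) (orig, 0)).2 = (c : Int) - ((keptRow (orig.getD (L-1) []) c).length : Int) := by
  intro c
  induction c with
  | zero =>
    intro _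
    refine ⟨⟨rfl, fun _ => rfl, ?_⟩, by simp [keptRow]⟩
    intro l' j'
    simp [keptRow, specCell]
  | succ c ih =>
    intro hcC
    obtain ⟨⟨plen, prow, pcell⟩, pd⟩ := ih (by omega)
    rw [List.range_succ, List.foldl_append, List.foldl_cons, List.foldl_nil]
    set p := (List.range c).foldl (fun (st : List (List Int) × Int) (k : Nat) =>
          if pvCell st.1 ((L : Int) - 1) (k : Int) == 0 then (st.1, st.2 + 1)
          else if st.2 > 0 then
            ((PySem.List.pyRange 0 (L : Int) 1).foldl
              (fun b l => pvSet (pvSet b l ((k : Int) - st.2) (pvCell b l (k : Int))) l (k : Int) 0) st.1, st.2)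
          else st) (orig, 0) with hp
    set bottom := orig.getD (L-1) [] with hbot
    set kb := keptRow bottom c with hkb
    have hkblt : ∀ j ∈ kb, j < c := keptRow_lt bottom c
    have hkble : kb.length ≤ c := keptRow_len_le bottom c
    -- the scrutinised cell is the original bottom cell
    have hbc : pvCell p.1 ((L : Int) - 1) (c : Int) = bottom.getD c 0 := by
      rw [show ((L : Int) - 1) = ((L - 1 : Nat) : Int) by omega, pvCell_natCast, pcell]
      simp only [specCell, if_pos (by omega : L - 1 < L)]
      rw [if_neg (by omega), if_neg (by intro h; exact absurd (hkblt c h) (by omega))]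
      rfl
    rw [hbc, keptRow_succ]
    rw [show keptRow bottom c = kb from rfl]
    by_cases hz : bottom.getD c 0 = 0
    · rw [if_pos (show (bottom.getD c 0 == 0) = true by simp only [beq_iff_eq]; exact hz),
        if_neg (not_not_intro hz)]
      exact ⟨⟨plen, prow, pcell⟩, by rw [pd]; push_cast; ring⟩
    · rw [if_neg (show ¬ (bottom.getD c 0 == 0) = true by simp only [beq_iff_eq]; exact hz),
        if_pos (show bottom.getD c 0 ≠ 0 from hz)]
      by_cases hdisp : kb.length < c
      · -- a real shift of column c to position kb.length
        rw [if_pos (by rw [pd]; omega : p.2 > 0)]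
        rw [pd, show ((c : Int) - ((c : Int) - (kb.length : Int))) = ((kb.length : Nat) : Int) by omega]
        rw [PySem.List.pyRange_zero_natCast, List.foldl_map]
        simp only [pvSet_natCast, pvCell_natCast]
        obtain ⟨slen, srow, scell⟩ := shift_fold p.1 L c kb.length (by omega)
          (by omega)
          (fun l hl => by rw [prow]; have := hC l hl; omega)
          (fun l hl => by rw [prow]; have := hC l hl; omega)
        refine ⟨⟨by rw [slen, plen], fun l' => by rw [srow, prow], ?_⟩,
          by simp only [List.length_append, List.length_cons, List.length_nil]; push_cast; omega⟩
        intro l' j'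
        rw [scell]
        simp only [pcell]
        have hg1 : ∀ j, j < kb.length → (kb ++ [c]).getD j 0 = kb.getD j 0 := fun j hj => by
          rw [List.getD_eq_getElem _ _ (by simp; omega), List.getD_eq_getElem _ _ hj,
            List.getElem_append_left hj]
        have hg2 : (kb ++ [c]).getD kb.length 0 = c := by
          rw [List.getD_eq_getElem _ _ (by simp)]; simp
        have hspecc : specCell orig L kb l' c = cellN orig l' c := by
          by_cases hl' : l' < L
          · simp only [specCell, if_pos hl']
            rw [if_neg (by omega), if_neg (by intro h; exact absurd (hkblt c h) (by omega))]
          · simp only [specCell, if_neg hl']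
        by_cases hl' : l' < L
        · by_cases h1 : j' = kb.length
          · subst h1
            rw [if_pos ⟨hl', rfl⟩, hspecc]
            simp only [specCell, if_pos hl']
            rw [if_pos (show kb.length < (kb ++ [c]).length by simp), hg2]
          · by_cases h2 : j' = c
            · rw [if_neg (by omega), if_pos ⟨hl', h2⟩]
              simp only [specCell, if_pos hl']
              rw [if_neg (show ¬ j' < (kb ++ [c]).length by simp; omega),
                if_pos (show j' ∈ kb ++ [c] by simp [h2])]
            · rw [if_neg (by omega), if_neg (by omega)]
              simp only [specCell, if_pos hl']
              by_cases h3 : j' < kb.length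
              · rw [if_pos h3, if_pos (show j' < (kb ++ [c]).length by simp; omega), hg1 _ h3]
              · rw [if_neg h3, if_neg (show ¬ j' < (kb ++ [c]).length by simp; omega)]
                by_cases h4 : j' ∈ kb
                · rw [if_pos h4, if_pos (show j' ∈ kb ++ [c] by simp [h4])]
                · rw [if_neg h4, if_neg (show ¬ j' ∈ kb ++ [c] by simp [h4, h2])]
        · rw [if_neg (by omega), if_neg (by omega)]
          simp only [specCell, if_neg hl']
      · -- no shift needed: every column so far is kept
        have hfull : kb.length = c := by omega
        have hrange : kb = List.range c := keptRow_full bottom c hfull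
        rw [if_neg (by rw [pd]; omega : ¬ p.2 > 0)]
        refine ⟨⟨plen, prow, ?_⟩, by simp only [List.length_append, List.length_cons, List.length_nil]; rw [pd, hfull]; push_cast; omega⟩
        intro l' j'
        rw [pcell, hrange]
        rw [show List.range c ++ [c] = List.range (c+1) by rw [List.range_succ]]
        rw [specCell_range, specCell_range]

lemma portA_agrees (orig : List (List Int)) (L C : Nat) (hL : 1 ≤ L)
    (hLlen : L ≤ orig.length)
    (hC : ∀ l < L, C ≤ (orig.getD l []).length) :
    Agrees orig (concatenate_columns orig (L : Int) (C : Int)) L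
      (keptRow (orig.getD (L - 1) []) C) := by
  unfold concatenate_columns
  rw [show PySem.List.pyRange 0 (C : Int) 1 = List.map (fun (k : Nat) => (k : Int)) (List.range C) from
    PySem.List.pyRange_zero_natCast C, List.foldl_map]
  exact (portA_loop orig L C hL hLlen hC C le_rfl).1

lemma prefix_fold (b0 : List (List Int)) (m k : Nat) (w : Nat → Int)
    (hm : m < b0.length) (hk : k ≤ (b0.getD m []).length) :
    ((List.range k).foldl (fun b i => setN b m i (w i)) b0).length = b0.length ∧
    (∀ l', (((List.range k).foldl (fun b i => setN b m i (w i)) b0).getD l' []).length = (b0.getD l' []).length) ∧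
    (∀ l' j', cellN ((List.range k).foldl (fun b i => setN b m i (w i)) b0) l' j' =
      if l' = m ∧ j' < k then w j' else cellN b0 l' j') := by
  induction k with
  | zero => simp
  | succ K ih =>
    obtain ⟨ihlen, ihrow, ihcell⟩ := ih (by omega)
    rw [List.range_succ, List.foldl_append, List.foldl_cons, List.foldl_nil]
    set rK := (List.range K).foldl (fun b i => setN b m i (w i)) b0 with hrK
    refine ⟨by simp [length_setN, ihlen], fun l' => by rw [rowlen_setN, ihrow], ?_⟩
    intro l' j'
    rw [cellN_setN _ _ _ _ _ _ (by omega) (by rw [ihrow]; omega), ihcell]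
    clear hrK ihlen ihrow ihcell
    by_cases h1 : l' = m
    · subst h1
      split_ifs <;> first | rfl | omega | (rename_i hh _; rw [hh.2])
    · split_ifs <;> first | rfl | omega

lemma zero_fold (b0 : List (List Int)) (m : Nat) (ns : List Nat)
    (hm : m < b0.length) (hns : ∀ j ∈ ns, j < (b0.getD m []).length) :
    (ns.foldl (fun b c => setN b m c 0) b0).length = b0.length ∧
    (∀ l', ((ns.foldl (fun b c => setN b m c 0) b0).getD l' []).length = (b0.getD l' []).length) ∧
    (∀ l' j', cellN (ns.foldl (fun b c => setN b m c 0) b0) l' j' =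
      if l' = m ∧ j' ∈ ns then 0 else cellN b0 l' j') := by
  induction ns generalizing b0 with
  | nil => simp
  | cons n ns ih =>
    rw [List.foldl_cons]
    obtain ⟨ihlen, ihrow, ihcell⟩ := ih (setN b0 m n 0)
      (by rw [length_setN]; omega)
      (fun j hj => by rw [rowlen_setN]; exact hns j (by simp [hj]))
    refine ⟨by rw [ihlen, length_setN], fun l' => by rw [ihrow, rowlen_setN], ?_⟩
    intro l' j'
    rw [ihcell, cellN_setN _ _ _ _ _ _ (by omega) (hns n (by simp))]
    by_cases h1 : l' = m
    · subst h1
      by_cases h2 : j' ∈ ns <;> by_cases h3 : j' = n <;> simp [h2, h3]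
    · simp [h1]

lemma portB_loop (orig : List (List Int)) (L k : Nat) (w : Nat → Nat → Int) (vs : List Nat)
    (hL : L ≤ orig.length)
    (hk : ∀ l < L, k ≤ (orig.getD l []).length)
    (hvs : ∀ j ∈ vs, ∀ l < L, j < (orig.getD l []).length)
    (hvk : ∀ j ∈ vs, k ≤ j) :
    ∀ m ≤ L,
      ((List.range m).foldl (fun b r =>
          vs.foldl (fun b c => setN b r c 0)
            ((List.range k).foldl (fun b i => setN b r i (w r i)) b)) orig).length = orig.length ∧
      (∀ l', (((List.range m).foldl (fun b r =>
          vs.foldl (fun b c => setN b r c 0)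
            ((List.range k).foldl (fun b i => setN b r i (w r i)) b)) orig).getD l' []).length = (orig.getD l' []).length) ∧
      (∀ l' j', cellN ((List.range m).foldl (fun b r =>
          vs.foldl (fun b c => setN b r c 0)
            ((List.range k).foldl (fun b i => setN b r i (w r i)) b)) orig) l' j' =
        if l' < m then
          if j' < k then w l' j' else if j' ∈ vs then 0 else cellN orig l' j'
        else cellN orig l' j') := by
  intro m
  induction m with
  | zero => intro _; exact ⟨rfl, fun _ => rfl, fun l' j' => by simp⟩
  | succ m ih =>
    intro hm
    obtain ⟨ihlen, ihrow, ihcell⟩ := ih (by omega)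
    rw [List.range_succ, List.foldl_append, List.foldl_cons, List.foldl_nil]
    set p := (List.range m).foldl (fun b r =>
          vs.foldl (fun b c => setN b r c 0)
            ((List.range k).foldl (fun b i => setN b r i (w r i)) b)) orig with hp
    obtain ⟨flen, frow, fcell⟩ := prefix_fold p m k (w m) (by omega)
      (by rw [ihrow]; exact hk m (by omega))
    set q := (List.range k).foldl (fun b i => setN b m i (w m i)) p with hq
    obtain ⟨zlen, zrow, zcell⟩ := zero_fold q m vs (by rw [flen]; omega)
      (fun j hj => by rw [frow, ihrow]; exact hvs j hj m (by omega))
    refine ⟨by rw [zlen, flen, ihlen], fun l' => by rw [zrow, frow, ihrow], ?_⟩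
    intro l' j'
    rw [zcell, fcell, ihcell]
    by_cases hmem : j' ∈ vs
    · have hkj := hvk j' hmem
      by_cases h1 : l' = m
      · subst h1
        rw [if_pos ⟨rfl, hmem⟩, if_pos (show l' < l' + 1 by omega),
          if_neg (show ¬ j' < k by omega), if_pos hmem]
      · rw [if_neg (show ¬ (l' = m ∧ j' ∈ vs) from fun h => h1 h.1),
          if_neg (show ¬ (l' = m ∧ j' < k) from fun h => h1 h.1)]
        by_cases h2 : l' < m
        · rw [if_pos h2, if_pos (show l' < m + 1 by omega)]
        · rw [if_neg h2, if_neg (show ¬ l' < m + 1 by omega)]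
    · by_cases h1 : l' = m
      · subst h1
        rw [if_neg (show ¬ (l' = l' ∧ j' ∈ vs) from fun h => hmem h.2),
          if_pos (show l' < l' + 1 by omega)]
        by_cases h2 : j' < k
        · rw [if_pos ⟨rfl, h2⟩, if_pos h2]
        · rw [if_neg (show ¬ (l' = l' ∧ j' < k) from fun h => h2 h.2),
            if_neg (show ¬ l' < l' by omega), if_neg h2, if_neg hmem]
      · rw [if_neg (show ¬ (l' = m ∧ j' ∈ vs) from fun h => h1 h.1),
          if_neg (show ¬ (l' = m ∧ j' < k) from fun h => h1 h.1)]
        by_cases h2 : l' < m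
        · rw [if_pos h2, if_pos (show l' < m + 1 by omega)]
        · rw [if_neg h2, if_neg (show ¬ l' < m + 1 by omega)]

lemma portB_agrees (orig : List (List Int)) (L C : Nat) (hL : 1 ≤ L)
    (hLlen : L ≤ orig.length)
    (hC : ∀ l < L, C ≤ (orig.getD l []).length) :
    Agrees orig (concatenate_columns_alt orig (L : Int) (C : Int)) L
      (keptRow (orig.getD (L - 1) []) C) := by
  unfold concatenate_columns_alt
  rw [show ((L : Int) - 1) = ((L - 1 : Nat) : Int) by omega]
  simp only [PySem.List.pyGet?_natCast]
  have hB : orig[L-1]?.getD [] = orig.getD (L-1) [] := rfl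
  rw [hB]
  set bottom := orig.getD (L-1) [] with hbot
  set kn := keptRow bottom C with hkn
  -- the kept list is the cast image of keptRow
  have hkept : (PySem.List.pyRange 0 (C : Int) 1).filter
      (fun c => !((PySem.List.pyGet? bottom c).getD 0 == 0)) = kn.map (fun (n : Nat) => (n : Int)) := by
    rw [PySem.List.pyRange_zero_natCast, List.filter_map]
    congr 1
    rw [hkn, keptRow]
    exact List.filter_congr (fun c _ => by
      simp only [Function.comp, PySem.List.pyGet?_natCast, ne_eq, decide_not]
      rfl)
  rw [hkept]
  have hcols : (kn.map (fun (n : Nat) => (n : Int))).map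
      (fun c => (PySem.List.pyRange 0 (L : Int) 1).map (fun l => pvCell orig l c))
      = kn.map (fun n => (List.range L).map (fun m => cellN orig m n)) := by
    rw [List.map_map]
    apply List.map_congr_left
    intro n _
    simp only [Function.comp_apply]
    rw [show PySem.List.pyRange 0 (L : Int) 1 = List.map (fun (k : Nat) => (k : Int)) (List.range L) from
      PySem.List.pyRange_zero_natCast L, List.map_map]
    apply List.map_congr_left
    intro m _
    exact pvCell_natCast orig m n
  rw [hcols]
  set colsN := kn.map (fun n => (List.range L).map (fun m => cellN orig m n)) with hcolsN
  simp only [List.length_map]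
  have hvac : (kn.map (fun (n : Nat) => (n : Int))).filter (fun c => decide ((kn.length : Int) ≤ c))
      = (kn.filter (fun n => decide (kn.length ≤ n))).map (fun (n : Nat) => (n : Int)) := by
    rw [List.filter_map]
    congr 1
    exact List.filter_congr (fun n _ => by simp [Function.comp])
  rw [hvac]
  set vsn := kn.filter (fun n => decide (kn.length ≤ n)) with hvsn
  rw [show PySem.List.pyRange 0 (L : Int) 1 = List.map (fun (k : Nat) => (k : Int)) (List.range L) from
    PySem.List.pyRange_zero_natCast L]
  rw [show PySem.List.pyRange 0 (kn.length : Int) 1 = List.map (fun (k : Nat) => (k : Int)) (List.range kn.length) from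
    PySem.List.pyRange_zero_natCast kn.length]
  simp only [List.foldl_map, pvSet_natCast]
  have hvk : ∀ j ∈ vsn, kn.length ≤ j := fun j hj => by
    rw [hvsn] at hj
    have := (List.mem_filter.mp hj).2
    simpa using this
  have hknmem : ∀ j ∈ kn, j < C := keptRow_lt bottom C
  have hvs : ∀ j ∈ vsn, ∀ l < L, j < (orig.getD l []).length := fun j hj l hl => by
    have : j ∈ kn := (List.mem_filter.mp hj).1
    have := hknmem j this
    have := hC l hl
    omega
  have hkle : ∀ l < L, kn.length ≤ (orig.getD l []).length := fun l hl => by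
    have h1 : kn.length ≤ C := by rw [hkn]; exact keptRow_len_le bottom C
    have := hC l hl
    omega
  obtain ⟨blen, brow, bcell⟩ := portB_loop orig L kn.length
    (fun r i => (PySem.List.pyGet? ((PySem.List.pyGet? colsN (i : Int)).getD []) (r : Int)).getD 0)
    vsn hLlen hkle hvs hvk L le_rfl
  refine ⟨blen, brow, fun l' j' => ?_⟩
  refine (bcell l' j').trans ?_
  have hw : ∀ r < L, ∀ i, i < kn.length →
      (PySem.List.pyGet? ((PySem.List.pyGet? colsN (i : Int)).getD []) (r : Int)).getD 0
        = cellN orig r (kn.getD i 0) := by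
    intro r hr i hi
    simp only [PySem.List.pyGet?_natCast]
    rw [hcolsN]
    rw [List.getElem?_map, List.getElem?_eq_getElem hi]
    simp only [Option.map_some, Option.getD_some]
    rw [List.getElem?_map, List.getElem?_eq_getElem (show r < (List.range L).length by simpa using hr)]
    simp only [Option.map_some, Option.getD_some, List.getElem_range]
    rw [List.getD_eq_getElem _ _ hi]
  by_cases hl' : l' < L
  · simp only [specCell, if_pos hl']
    by_cases h1 : j' < kn.length
    · rw [if_pos h1, if_pos h1]
      exact hw l' hl' j' h1
    · rw [if_neg h1, if_neg h1]
      by_cases h2 : j' ∈ kn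
      · rw [if_pos (by rw [hvsn]; exact List.mem_filter.mpr ⟨h2, by simpa using (by omega : kn.length ≤ j')⟩), if_pos h2]
      · rw [if_neg (fun hj => h2 (List.mem_filter.mp hj).1), if_neg h2]
  · rw [if_neg hl']
    simp only [specCell, if_neg hl']

lemma portA_trivial (b : List (List Int)) (lines columns : Int) (h : lines ≤ 0 ∨ columns ≤ 0) :
    concatenate_columns b lines columns = b := by
  unfold concatenate_columns
  rcases h with h | h
  · rw [PySem.List.pyRange_one_eq_nil (a := 0) (b := lines) (by omega)]
    have hfst : ∀ (l : List Int) (st : List (List Int) × Int),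
        (l.foldl (fun (st : List (List Int) × Int) c =>
          if pvCell st.1 (lines - 1) c == 0 then (st.1, st.2 + 1)
          else if st.2 > 0 then (List.foldl (fun b l => pvSet (pvSet b l (c - st.2) (pvCell b l c)) l c 0) st.1 [], st.2)
          else st) st).1 = st.1 := by
      intro l
      induction l with
      | nil => intro st; rfl
      | cons y ys ih =>
        intro st
        rw [List.foldl_cons, ih]
        split_ifs <;> rfl
    exact hfst _ _
  · rw [PySem.List.pyRange_one_eq_nil (a := 0) (b := columns) (by omega)]
    simp
lemma portB_trivial (b : List (List Int)) (lines columns : Int) (h : lines ≤ 0 ∨ columns ≤ 0) :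
    concatenate_columns_alt b lines columns = b := by
  unfold concatenate_columns_alt
  rcases h with h | h
  · rw [PySem.List.pyRange_one_eq_nil (a := 0) (b := lines) (by omega)]
    simp
  · rw [PySem.List.pyRange_one_eq_nil (a := 0) (b := columns) (by omega)]
    simp

-- ===== VERDICT (by name: the statement is the Claim_ definition above) =====
theorem concatenate_columns_spec : Claim_equal_concatenate_columns := by
  intro boardcopy lines columns _hdom hpre
  obtain ⟨hp1, hp2, hp3, hp4⟩ := hpre
  unfold Spec_concatenate_columns
  by_cases hcz : columns ≤ 0
  · rw [portA_trivial _ _ _ (Or.inr hcz), portB_trivial _ _ _ (Or.inr hcz)]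
  · by_cases hlz : lines ≤ 0
    · rw [portA_trivial _ _ _ (Or.inl hlz), portB_trivial _ _ _ (Or.inl hlz)]
    · have h4 := hp4.resolve_left hlz
      set L := lines.toNat with hLdef
      set C := columns.toNat with hCdef
      have hlines : lines = (L : Int) := by omega
      have hcols : columns = (C : Int) := by omega
      have hL : 1 ≤ L := by omega
      have hLlen : L ≤ boardcopy.length := by omega
      have hC : ∀ l < L, C ≤ (boardcopy.getD l []).length := by
        intro l hl
        have hlen : l < (boardcopy.take L).length := by simp; omega
        have hmem : boardcopy.getD l [] ∈ boardcopy.take L := by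
          have hg : (boardcopy.take L)[l] = boardcopy.getD l [] := by
            rw [List.getElem_take, List.getD_eq_getElem _ _ (by omega)]
          rw [← hg]
          exact List.getElem_mem hlen
        have := h4 _ hmem
        omega
      rw [hlines, hcols]
      obtain ⟨la, ra, ca⟩ := portA_agrees boardcopy L C hL hLlen hC
      obtain ⟨lb, rb, cb⟩ := portB_agrees boardcopy L C hL hLlen hC
      exact eq_of_cells _ _ (by omega) (fun l => by rw [ra l, rb l]) (fun l j => by rw [ca l j, cb l j])
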